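-- pv_equiv track=rewrite | github.com/opensensor/bionpu | src/bionpu/kernels/genomics/primer_scan/__init__.py | _encode_primer_canon
-- ===== SOURCE A (Python) =====
-- _BASE_TO_2BIT: dict[str, int] = {"A": 0, "C": 1, "G": 2, "T": 3}
--
-- def _encode_primer_canon(primer: str) -> tuple[int, int]:
--     """Return ``(fwd_canonical_u64, rc_canonical_u64)`` for an ACGT primer.
--
--     Byte-equal to ``runner.cpp::encode_primer_ascii``: each base in
--     ``primer`` contributes 2 bits with the first base in the highest
--     2-bit lane.
--     """
--     p = len(primer)
--     if not 1 <= p <= 32: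
--         raise ValueError(f"primer length must be 1..32; got {p}")
--     fwd = 0
--     for ch in primer:
--         v = _BASE_TO_2BIT.get(ch.upper())
--         if v is None:
--             raise ValueError(f"non-ACGT base in primer: {ch!r}")
--         fwd = (fwd << 2) | v
--     mask = (~0 & ((1 << 64) - 1)) if p == 32 else ((1 << (2 * p)) - 1)
--     fwd &= mask
--     comp = fwd ^ mask
--     rc = 0
--     for _ in range(p):
--         rc = (rc << 2) | (comp & 0x3)
--         comp >>= 2
--     return fwd, rc
-- ===== SOURCE B (Python) =====
-- _BASE_TO_2BIT: dict[str, int] = {"A": 0, "C": 1, "G": 2, "T": 3}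
--
-- def _encode_primer_canon(primer: str) -> tuple[int, int]:
--     """Single-pass encoder: builds fwd and rc together, placing the
--     complement of base i directly at rc lane i (no mask / second loop)."""
--     p = len(primer)
--     if not 1 <= p <= 32:
--         raise ValueError(f"primer length must be 1..32; got {p}")
--     fwd = 0
--     rc = 0
--     for i, ch in enumerate(primer):
--         v = _BASE_TO_2BIT.get(ch.upper())
--         if v is None:
--             raise ValueError(f"non-ACGT base in primer: {ch!r}")
--         fwd = (fwd << 2) | v
--         rc |= (3 ^ v) << (2 * i)
--     return fwd, rc
-- ===== Notes on version B (the rewrite author's own statement) =====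
-- stated objective: simpler
-- what changed: B fuses A's two passes into one: while building fwd it also places the complemented base (3 ^ v) directly at rc lane 2*i, eliminating A's post-loop mask computation, the fwd &= mask no-op, the comp = fwd ^ mask step and the whole second digit-reversal loop.
import Mathlib
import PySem

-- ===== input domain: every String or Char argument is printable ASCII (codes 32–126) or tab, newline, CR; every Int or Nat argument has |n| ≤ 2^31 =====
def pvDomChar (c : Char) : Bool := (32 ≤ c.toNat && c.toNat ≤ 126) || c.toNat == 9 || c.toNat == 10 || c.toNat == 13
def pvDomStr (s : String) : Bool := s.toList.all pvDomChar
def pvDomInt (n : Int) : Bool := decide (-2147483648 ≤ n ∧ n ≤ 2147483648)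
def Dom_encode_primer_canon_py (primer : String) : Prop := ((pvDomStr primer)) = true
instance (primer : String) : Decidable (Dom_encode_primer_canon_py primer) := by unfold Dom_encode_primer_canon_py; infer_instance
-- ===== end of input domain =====

-- B fuses A's two loops into one pass: rc lane i is directly the complement of base i,
-- so the post-loop mask / xor / digit-reversal loop disappears (objective: simpler).

-- ===== PORT A =====
-- _BASE_TO_2BIT = {"A": 0, "C": 1, "G": 2, "T": 3}; keys are 1-char strings, modelled as Char
def pvBaseTo2Bit : PySem.Dict Char Int := PySem.Dict.ofList [('A', 0), ('C', 1), ('G', 2), ('T', 3)]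

-- for ch in primer: v = _BASE_TO_2BIT.get(ch.upper()); if v is None: raise; fwd = (fwd << 2) | v
-- (none = the ValueError path)
def pvFwdLoopA : List Char → Int → Option Int
  | [], fwd => some fwd
  | ch :: rest, fwd =>
    match pvBaseTo2Bit.get? (PySem.Chars.upperChar ch) with
    | none => none
    | some v => pvFwdLoopA rest (PySem.Int.bor (fwd <<< (2 : Nat)) v)

-- for _ in range(p): rc = (rc << 2) | (comp & 0x3); comp >>= 2
def pvRcLoopA : Nat → Int → Int → Int
  | 0, rc, _ => rc
  | k + 1, rc, comp =>
    pvRcLoopA k (PySem.Int.bor (rc <<< (2 : Nat)) (PySem.Int.band comp 3)) (comp >>> (2 : Nat))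

def encode_primer_canon_py (primer : String) : Int × Int :=
  let p : Int := PySem.Str.len primer
  if ¬ (1 ≤ p ∧ p ≤ 32) then (0, 0)   -- raise ValueError (length): excluded by Pre_
  else
    match pvFwdLoopA primer.toList 0 with
    | none => (0, 0)                   -- raise ValueError (non-ACGT base): excluded by Pre_
    | some fwd0 =>
      let mask : Int :=
        if p = 32 then PySem.Int.band (Int.not 0) ((1 <<< (64 : Nat)) - 1)
        else (1 <<< (2 * p).toNat) - 1
      let fwd := PySem.Int.band fwd0 mask
      let comp := PySem.Int.bxor fwd mask
      let rc := pvRcLoopA p.toNat 0 comp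
      (fwd, rc)

-- ===== PORT B =====
-- single loop: for i, ch in enumerate(primer): fwd = (fwd << 2) | v; rc |= (3 ^ v) << (2*i)
def pvEncLoopB : List Char → Nat → Int → Int → Option (Int × Int)
  | [], _, fwd, rc => some (fwd, rc)
  | ch :: rest, i, fwd, rc =>
    match pvBaseTo2Bit.get? (PySem.Chars.upperChar ch) with
    | none => none
    | some v =>
      pvEncLoopB rest (i + 1) (PySem.Int.bor (fwd <<< (2 : Nat)) v)
        (PySem.Int.bor rc ((PySem.Int.bxor 3 v) <<< (2 * i)))

def encode_primer_canon_py_alt (primer : String) : Int × Int :=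
  let p : Int := PySem.Str.len primer
  if ¬ (1 ≤ p ∧ p ≤ 32) then (0, 0)   -- raise ValueError (length)
  else
    match pvEncLoopB primer.toList 0 0 0 with
    | none => (0, 0)                   -- raise ValueError (non-ACGT base)
    | some out => out

-- ===== PRECONDITION & SPEC =====
-- Pre_ excludes exactly the inputs on which A raises ValueError: length outside 1..32,
-- or a character whose uppercase form is not one of A/C/G/T.
def Pre_encode_primer_canon_py (primer : String) : Prop :=
  1 ≤ PySem.Str.len primer ∧ PySem.Str.len primer ≤ 32 ∧
    (primer.toList.all
      (fun c => (['A', 'C', 'G', 'T', 'a', 'c', 'g', 't'] : List Char).contains c)) = true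
instance (primer : String) : Decidable (Pre_encode_primer_canon_py primer) := by
  unfold Pre_encode_primer_canon_py; infer_instance

def pvWitness_encode_primer_canon_py : String := "ACGT"

def Spec_encode_primer_canon_py (primer : String) (out : Int × Int) : Prop :=
  out = encode_primer_canon_py_alt primer
instance (primer : String) (out : Int × Int) : Decidable (Spec_encode_primer_canon_py primer out) := by
  unfold Spec_encode_primer_canon_py; infer_instance

-- ===== CLAIM (what is proved, stated in full; the proofs are below) =====
def Claim_equal_encode_primer_canon_py : Prop :=
  ∀ (primer : String), Dom_encode_primer_canon_py primer →
    Pre_encode_primer_canon_py primer →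
    Spec_encode_primer_canon_py primer (encode_primer_canon_py primer)

-- ===== LEMMAS AND PROOFS =====

set_option maxRecDepth 10000 in
theorem pv_upper_mem {c : Char} (h : c ∈ (['A', 'C', 'G', 'T', 'a', 'c', 'g', 't'] : List Char)) :
    PySem.Chars.upperChar c ∈ (['A', 'C', 'G', 'T'] : List Char) := by
  fin_cases h <;> decide

-- the 2-bit code of a valid character (proof-side only)
def pvVal (c : Char) : Int :=
  if PySem.Chars.upperChar c = 'A' then 0
  else if PySem.Chars.upperChar c = 'C' then 1
  else if PySem.Chars.upperChar c = 'G' then 2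
  else 3

-- value of a little-endian list of base-4 digits
def pvD : List Int → Int
  | [] => 0
  | d :: ds => d + 4 * pvD ds

-- abstract "shift-in" accumulator loop (shared shape of A's two loops and B's fwd)
def pvF : List Int → Int → Int
  | [], a => a
  | d :: ds, a => pvF ds (4 * a + d)

def pvOk (ds : List Int) : Prop := ∀ d ∈ ds, 0 ≤ d ∧ d < 4

theorem pv_get_val {c : Char}
    (h : PySem.Chars.upperChar c ∈ (['A', 'C', 'G', 'T'] : List Char)) :
    pvBaseTo2Bit.get? (PySem.Chars.upperChar c) = some (pvVal c) ∧ 0 ≤ pvVal c ∧ pvVal c < 4 := by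
  simp only [List.mem_cons, List.not_mem_nil, or_false] at h
  rcases h with h | h | h | h <;> rw [pvVal, h] <;> simp [pvBaseTo2Bit] <;> decide

theorem pvD_bounds {ds : List Int} (h : pvOk ds) :
    0 ≤ pvD ds ∧ pvD ds < 4 ^ ds.length := by
  induction ds with
  | nil => simp [pvD]
  | cons d ds ih =>
    obtain ⟨hd, hds⟩ := List.forall_mem_cons.mp h
    obtain ⟨h0, h1⟩ := ih hds
    constructor
    · simp [pvD]; omega
    · simp only [pvD, List.length_cons, pow_succ]
      nlinarith [hd.1, hd.2]

theorem pvD_append (ds : List Int) (d : Int) :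
    pvD (ds ++ [d]) = pvD ds + d * 4 ^ ds.length := by
  induction ds with
  | nil => simp [pvD]
  | cons e ds ih => simp only [List.cons_append, pvD, ih, List.length_cons, pow_succ]; ring

theorem pvF_eq (ds : List Int) (a : Int) :
    pvF ds a = a * 4 ^ ds.length + pvD ds.reverse := by
  induction ds generalizing a with
  | nil => simp [pvF, pvD]
  | cons d ds ih =>
    simp only [pvF, ih, List.reverse_cons, pvD_append, List.length_reverse, List.length_cons,
      pow_succ]
    ring

theorem pvD_comp {ds : List Int} (h : pvOk ds) :
    pvD (ds.map (fun d => 3 - d)) = 4 ^ ds.length - 1 - pvD ds := by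
  induction ds with
  | nil => simp [pvD]
  | cons d ds ih =>
    obtain ⟨-, hds⟩ := List.forall_mem_cons.mp h
    simp only [List.map_cons, pvD, ih hds, List.length_cons, pow_succ]
    ring

-- (fwd << 2) | v = 4*fwd + v for nonneg fwd and 0 ≤ v < 4
theorem pv_bor_shl2 {a v : Int} (ha : 0 ≤ a) (hv0 : 0 ≤ v) (hv : v < 4) :
    PySem.Int.bor (a <<< (2 : Nat)) v = 4 * a + v := by
  obtain ⟨m, rfl⟩ := Int.eq_ofNat_of_zero_le ha
  obtain ⟨t, rfl⟩ := Int.eq_ofNat_of_zero_le hv0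
  rw [← Int.natCast_shiftLeft, PySem.Int.bor_natCast]
  have ht : t < 2 ^ 2 := by exact_mod_cast hv
  have := Nat.two_pow_add_eq_or_of_lt ht m
  rw [Nat.shiftLeft_eq_mul_pow, Nat.mul_comm, ← this]
  push_cast; ring

-- rc | (w << 2*i) = rc + w*4^i when rc < 4^i
theorem pv_bor_lane {rc w : Int} (i : Nat) (h0 : 0 ≤ rc) (h1 : rc < 4 ^ i) (hw : 0 ≤ w) :
    PySem.Int.bor rc (w <<< (2 * i)) = rc + w * 4 ^ i := by
  obtain ⟨m, rfl⟩ := Int.eq_ofNat_of_zero_le h0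
  obtain ⟨u, rfl⟩ := Int.eq_ofNat_of_zero_le hw
  rw [← Int.natCast_shiftLeft, PySem.Int.bor_natCast]
  have hm : m < 2 ^ (2 * i) := by
    have : ((4 : Int) ^ i) = ((2 ^ (2 * i) : Nat) : Int) := by
      push_cast; rw [pow_mul]; norm_num
    rw [this] at h1; exact_mod_cast h1
  have := Nat.two_pow_add_eq_or_of_lt hm u
  rw [Nat.lor_comm, Nat.shiftLeft_eq_mul_pow, Nat.mul_comm u _, ← this]
  push_cast
  rw [pow_mul]; push_cast; ring

theorem pv_nat_xor_mask : ∀ (k x : Nat), x < 2 ^ k → x ^^^ (2 ^ k - 1) = 2 ^ k - 1 - x := by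
  intro k
  induction k with
  | zero => intro x hx; interval_cases x; decide
  | succ k ih =>
    intro x hx
    have hp : 2 ^ (k + 1) = 2 * 2 ^ k := by rw [pow_succ]; ring
    have hd : (x ^^^ (2 ^ (k + 1) - 1)) / 2 = x / 2 ^^^ (2 ^ k - 1) := by
      rw [Nat.xor_div_two]; congr 1; omega
    have hx2 : x / 2 < 2 ^ k := by omega
    rw [ih _ hx2] at hd
    have hm : (x ^^^ (2 ^ (k + 1) - 1)) % 2 = x % 2 ^^^ (2 ^ (k + 1) - 1) % 2 := by
      have := @Nat.xor_mod_two_pow x (2 ^ (k + 1) - 1) 1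
      simpa using this
    have hmm : (2 ^ (k + 1) - 1) % 2 = 1 := by omega
    rw [hmm] at hm
    have hdm := Nat.div_add_mod (x ^^^ (2 ^ (k + 1) - 1)) 2
    rcases Nat.mod_two_eq_zero_or_one x with h | h
    · rw [h] at hm
      have hm1 : (x ^^^ (2 ^ (k + 1) - 1)) % 2 = 1 := by rw [hm]; decide
      omega
    · rw [h] at hm
      have hm1 : (x ^^^ (2 ^ (k + 1) - 1)) % 2 = 0 := by rw [hm]; decide
      omega

theorem pv_bxor_mask {x : Int} (n : Nat) (h0 : 0 ≤ x) (h1 : x < 4 ^ n) :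
    PySem.Int.bxor x ((4 : Int) ^ n - 1) = 4 ^ n - 1 - x := by
  obtain ⟨m, rfl⟩ := Int.eq_ofNat_of_zero_le h0
  have e1 : ((2 : Int)) ^ (2 * n) = 4 ^ n := by rw [pow_mul]; norm_num
  have h4 : ((4 : Int) ^ n - 1) = ((2 ^ (2 * n) - 1 : Nat) : Int) := by
    rw [Nat.cast_sub Nat.one_le_two_pow]; push_cast; rw [e1]
  have hm : m < 2 ^ (2 * n) := by
    have : ((4 : Int) ^ n) = ((2 ^ (2 * n) : Nat) : Int) := by push_cast; rw [e1]
    rw [this] at h1; exact_mod_cast h1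
  rw [h4, PySem.Int.bxor_natCast, pv_nat_xor_mask _ _ hm]
  rw [Nat.cast_sub (by omega), Nat.cast_sub Nat.one_le_two_pow]

-- x & (4^n - 1) = x for 0 ≤ x < 4^n  (the `fwd &= mask` no-op)
theorem pv_band_mask {x : Int} (n : Nat) (h0 : 0 ≤ x) (h1 : x < 4 ^ n) :
    PySem.Int.band x ((4 : Int) ^ n - 1) = x := by
  obtain ⟨m, rfl⟩ := Int.eq_ofNat_of_zero_le h0
  have h4 : ((4 : Int) ^ n - 1) = ((2 ^ (2 * n) - 1 : Nat) : Int) := by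
    have : (1 : Nat) ≤ 2 ^ (2 * n) := Nat.one_le_two_pow
    push_cast [this]
    rw [pow_mul]; norm_num
  have hm : m < 2 ^ (2 * n) := by
    have : ((4 : Int) ^ n) = ((2 ^ (2 * n) : Nat) : Int) := by push_cast; rw [pow_mul]; norm_num
    rw [this] at h1; exact_mod_cast h1
  rw [h4, PySem.Int.band_natCast, Nat.and_two_pow_sub_one_eq_mod, Nat.mod_eq_of_lt hm]

theorem pv_band3 {d e : Int} (hd0 : 0 ≤ d) (hd : d < 4) (he : 0 ≤ e) :
    PySem.Int.band (d + 4 * e) 3 = d := by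
  have h0 : 0 ≤ d + 4 * e := by omega
  obtain ⟨m, hm⟩ := Int.eq_ofNat_of_zero_le h0
  have h3 : m &&& 3 = m % 4 := by simpa using Nat.and_two_pow_sub_one_eq_mod m 2
  rw [hm, show ((3 : Int)) = ((3 : Nat) : Int) by norm_num, PySem.Int.band_natCast, h3]
  omega

theorem pv_shr2 {d e : Int} (hd0 : 0 ≤ d) (hd : d < 4) (he : 0 ≤ e) :
    (d + 4 * e) >>> (2 : Nat) = e := by
  have h0 : 0 ≤ d + 4 * e := by omega
  obtain ⟨m, hm⟩ := Int.eq_ofNat_of_zero_le h0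
  rw [hm, ← Int.natCast_shiftRight, Nat.shiftRight_eq_div_pow]
  have h4 : (2 : Nat) ^ 2 = 4 := rfl
  rw [h4]
  omega

theorem pv_bxor3 {v : Int} (h0 : 0 ≤ v) (h1 : v < 4) : PySem.Int.bxor 3 v = 3 - v := by
  interval_cases v <;> decide

theorem pvOk_map_val {cs : List Char}
    (h : ∀ c ∈ cs, PySem.Chars.upperChar c ∈ (['A', 'C', 'G', 'T'] : List Char)) :
    pvOk (cs.map pvVal) := by
  intro d hd
  obtain ⟨c, hc, rfl⟩ := List.mem_map.mp hd
  exact (pv_get_val (h c hc)).2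

theorem pvOk_reverse {ds : List Int} (h : pvOk ds) : pvOk ds.reverse := by
  intro d hd; exact h d (List.mem_reverse.mp hd)

theorem pvOk_comp {ds : List Int} (h : pvOk ds) : pvOk (ds.map (fun d => 3 - d)) := by
  intro d hd
  obtain ⟨e, he, rfl⟩ := List.mem_map.mp hd
  have := h e he; omega

theorem pvFwdLoopA_eq {cs : List Char}
    (h : ∀ c ∈ cs, PySem.Chars.upperChar c ∈ (['A', 'C', 'G', 'T'] : List Char)) :
    ∀ a : Int, 0 ≤ a → pvFwdLoopA cs a = some (pvF (cs.map pvVal) a) := by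
  induction cs with
  | nil => intro a _; simp [pvFwdLoopA, pvF]
  | cons c cs ih =>
    intro a ha
    obtain ⟨hc, hcs⟩ := List.forall_mem_cons.mp h
    obtain ⟨hget, hv0, hv1⟩ := pv_get_val hc
    simp only [pvFwdLoopA, hget, List.map_cons, pvF]
    rw [pv_bor_shl2 ha hv0 hv1]
    exact ih hcs _ (by omega)

theorem pvRcLoopA_eq {ds : List Int} (h : pvOk ds) :
    ∀ rc : Int, 0 ≤ rc → pvRcLoopA ds.length rc (pvD ds) = pvF ds rc := by
  induction ds with
  | nil => intro rc _; simp [pvRcLoopA, pvD, pvF]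
  | cons d ds ih =>
    intro rc hrc
    obtain ⟨⟨hd0, hd1⟩, hds⟩ := List.forall_mem_cons.mp h
    have he : 0 ≤ pvD ds := (pvD_bounds hds).1
    simp only [List.length_cons, pvRcLoopA, pvD, pvF]
    rw [pv_band3 hd0 hd1 he, pv_shr2 hd0 hd1 he, pv_bor_shl2 hrc hd0 hd1]
    exact ih hds _ (by omega)

theorem pvEncLoopB_eq {cs : List Char}
    (h : ∀ c ∈ cs, PySem.Chars.upperChar c ∈ (['A', 'C', 'G', 'T'] : List Char)) :
    ∀ (i : Nat) (fwd rc : Int), 0 ≤ fwd → 0 ≤ rc → rc < 4 ^ i →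
      pvEncLoopB cs i fwd rc =
        some (pvF (cs.map pvVal) fwd, rc + pvD ((cs.map pvVal).map (fun d => 3 - d)) * 4 ^ i) := by
  induction cs with
  | nil => intro i fwd rc _ _ _; simp [pvEncLoopB, pvF, pvD]
  | cons c cs ih =>
    intro i fwd rc hf hrc0 hrc1
    obtain ⟨hc, hcs⟩ := List.forall_mem_cons.mp h
    obtain ⟨hget, hv0, hv1⟩ := pv_get_val hc
    simp only [pvEncLoopB, hget, List.map_cons, pvF, pvD]
    rw [pv_bxor3 hv0 hv1, pv_bor_lane i hrc0 hrc1 (by omega), pv_bor_shl2 hf hv0 hv1]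
    have h4 : (0 : Int) < 4 ^ i := by positivity
    rw [ih hcs (i + 1) _ _ (by omega) (by nlinarith) (by rw [pow_succ]; nlinarith)]
    simp only [Option.some.injEq, Prod.mk.injEq]
    refine ⟨by trivial, ?_⟩
    rw [pow_succ]; ring

theorem pv_len_toList (s : String) : PySem.Str.len s = (s.toList.length : Int) := by
  simp [PySem.Str.len]

-- ===== VERDICT (by name: the statement is the Claim_ definition above) =====
theorem encode_primer_canon_py_spec : Claim_equal_encode_primer_canon_py := by
  intro primer _ hPre
  obtain ⟨hlen1, hlen2, hvalid0⟩ := hPre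
  have hvalid : ∀ c ∈ primer.toList, PySem.Chars.upperChar c ∈ (['A', 'C', 'G', 'T'] : List Char) := by
    intro c hc
    have := List.all_eq_true.mp hvalid0 c hc
    exact pv_upper_mem (by simpa using this)
  unfold Spec_encode_primer_canon_py encode_primer_canon_py encode_primer_canon_py_alt
  set cs := primer.toList with hcs
  set n := cs.length with hn
  have hp : PySem.Str.len primer = (n : Int) := pv_len_toList primer
  have hcond : ¬ ¬ (1 ≤ PySem.Str.len primer ∧ PySem.Str.len primer ≤ 32) := by
    simp only [not_not]; exact ⟨hlen1, hlen2⟩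
  simp only [hp] at hcond ⊢
  rw [if_neg hcond, if_neg hcond]
  set vs := cs.map pvVal with hvs
  have hokv : pvOk vs := pvOk_map_val hvalid
  have hlvs : vs.length = n := by rw [hvs, List.length_map]
  rw [pvFwdLoopA_eq hvalid 0 le_rfl, pvEncLoopB_eq hvalid 0 0 0 le_rfl le_rfl (by norm_num)]
  rw [← hvs]
  have hfwd : pvF vs 0 = pvD vs.reverse := by rw [pvF_eq]; ring
  have hokr : pvOk vs.reverse := pvOk_reverse hokv
  have hbnd := pvD_bounds hokr
  rw [List.length_reverse, hlvs] at hbnd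
  -- the mask is 4^n - 1 in both branches of A
  have hmask : (if (n : Int) = 32 then PySem.Int.band (Int.not 0) ((1 <<< (64 : Nat)) - 1)
      else (1 <<< (2 * (n : Int)).toNat) - 1) = (4 : Int) ^ n - 1 := by
    by_cases h32 : (n : Int) = 32
    · have hn32 : n = 32 := by exact_mod_cast h32
      rw [if_pos h32, hn32]; decide
    · rw [if_neg h32]
      have ht : (2 * (n : Int)).toNat = 2 * n := by omega
      rw [ht, Nat.shiftLeft_eq_mul_pow]
      push_cast; rw [pow_mul]; norm_num
  simp only [hmask, hfwd]
  rw [pv_band_mask n hbnd.1 hbnd.2, pv_bxor_mask n hbnd.1 hbnd.2]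
  have hcomp : (4 : Int) ^ n - 1 - pvD vs.reverse = pvD (vs.reverse.map (fun d => 3 - d)) := by
    rw [pvD_comp hokr, List.length_reverse, hlvs]
  have hlc : (vs.reverse.map (fun d => 3 - d)).length = n := by
    rw [List.length_map, List.length_reverse, hlvs]
  have htn : ((n : Int)).toNat = n := by omega
  rw [hcomp, htn, ← hlc, pvRcLoopA_eq (pvOk_comp hokr) 0 le_rfl, pvF_eq]
  simp only [Prod.mk.injEq]
  refine ⟨by trivial, ?_⟩
  rw [List.map_reverse, List.reverse_reverse]
  ring
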